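-- pv_equiv track=rewrite | github.com/dpflann/Project_Euler | pe57/pe57.py | find_top_heavy_expansions
-- ===== SOURCE A (Python) =====
-- def find_top_heavy_expansions(number_of_expansions=1000):
--   count = 0
--   expansions = [(3,2)]
--   for _ in range(number_of_expansions - 1):  # account for seeding with first expansion
--     previous_numerator, previous_denominator = expansions[-1]
--     next_numerator = previous_numerator + 2*previous_denominator
--     next_denominator = previous_numerator + previous_denominator
--     expansions.append((next_numerator, next_denominator))
--     if len(str(next_numerator)) > len(str(next_denominator)):
--       count += 1
--   return expansions, count
-- ===== SOURCE B (Python) =====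
-- def find_top_heavy_expansions(number_of_expansions=1000):
--   # Staged passes: first build only the denominator sequence d_n = 2*d_{n-1} + d_{n-2}
--   # (seeded 1, 2), then derive every expansion pair as (d_{i-1} + d_i, d_i) by zipping
--   # the sequence with itself, then tally the top-heavy terms past the seed (3, 2).
--   dens = [1, 2]
--   for _ in range(number_of_expansions - 1):
--     dens.append(2 * dens[-1] + dens[-2])
--   expansions = [(a + b, b) for a, b in zip(dens, dens[1:])]
--   count = sum(1 for n, d in expansions[1:] if len(str(n)) > len(str(d)))
--   return expansions, count
-- ===== Notes on version B (the rewrite author's own statement) =====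
-- stated objective: alternative
-- what changed: Replaces the single-pass coupled pair recurrence with three staged passes: build only the denominator sequence d_n = 2*d_{n-1} + d_{n-2}, derive every (numerator, denominator) pair afterwards by zipping the sequence with its own tail (numerator = d_{i-1} + d_i), then count top-heavy pairs in a separate scan over expansions[1:].
import Mathlib
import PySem

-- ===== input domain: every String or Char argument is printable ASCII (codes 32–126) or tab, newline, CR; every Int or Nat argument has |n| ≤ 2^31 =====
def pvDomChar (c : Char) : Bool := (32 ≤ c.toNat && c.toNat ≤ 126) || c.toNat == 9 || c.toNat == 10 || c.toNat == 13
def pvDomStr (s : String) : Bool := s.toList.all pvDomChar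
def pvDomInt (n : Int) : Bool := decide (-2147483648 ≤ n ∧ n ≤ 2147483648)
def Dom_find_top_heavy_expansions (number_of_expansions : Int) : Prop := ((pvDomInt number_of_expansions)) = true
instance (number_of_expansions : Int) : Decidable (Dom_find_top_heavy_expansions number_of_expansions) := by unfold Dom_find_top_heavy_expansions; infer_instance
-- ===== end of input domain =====

-- B replaces A's single-pass coupled pair recurrence with staged passes: a denominators-only
-- recurrence, then pair derivation by zipping, then a separate counting scan (objective: alternative).

-- ===== PORT A =====
-- loop body of A: read expansions[-1] (the list is never empty, so the Python index never raises;
-- getD's default is unreachable), push the coupled next pair, bump count on a longer numerator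
def pvStepA (st : (List (Int × Int)) × Int) (_ : Int) : (List (Int × Int)) × Int :=
  let (expansions, count) := st
  let (previous_numerator, previous_denominator) := (PySem.List.pyGet? expansions (-1)).getD (0, 0)
  let next_numerator := previous_numerator + 2 * previous_denominator
  let next_denominator := previous_numerator + previous_denominator
  let expansions := expansions ++ [(next_numerator, next_denominator)]
  let count := if PySem.Str.len (PySem.Int.toStr next_numerator) > PySem.Str.len (PySem.Int.toStr next_denominator) then count + 1 else count
  (expansions, count)

def find_top_heavy_expansions (number_of_expansions : Int) : (List (Int × Int)) × Int :=
  (PySem.List.pyRange 0 (number_of_expansions - 1) 1).foldl pvStepA ([(3, 2)], 0)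

-- ===== PORT B =====
-- stage 1 body: append 2*dens[-1] + dens[-2] (dens always has ≥ 2 elements, so the
-- Python negative indices never raise; getD's default is unreachable)
def pvStepB (dens : List Int) (_ : Int) : List Int :=
  dens ++ [2 * (PySem.List.pyGet? dens (-1)).getD 0 + (PySem.List.pyGet? dens (-2)).getD 0]

def find_top_heavy_expansions_alt (number_of_expansions : Int) : (List (Int × Int)) × Int :=
  let dens := (PySem.List.pyRange 0 (number_of_expansions - 1) 1).foldl pvStepB [1, 2]
  -- [(a + b, b) for a, b in zip(dens, dens[1:])]
  let expansions := (dens.zip (PySem.List.slice dens (some 1) none)).map (fun p => (p.1 + p.2, p.2))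
  -- sum(1 for n, d in expansions[1:] if len(str(n)) > len(str(d)))
  let count := (PySem.List.slice expansions (some 1) none).foldl
    (fun c p => if PySem.Str.len (PySem.Int.toStr p.1) > PySem.Str.len (PySem.Int.toStr p.2) then c + 1 else c) 0
  (expansions, count)

-- ===== PRECONDITION & SPEC =====
def Spec_find_top_heavy_expansions (number_of_expansions : Int) (out : (List (Int × Int)) × Int) : Prop := out = find_top_heavy_expansions_alt number_of_expansions
instance (number_of_expansions : Int) (out : (List (Int × Int)) × Int) : Decidable (Spec_find_top_heavy_expansions number_of_expansions out) := by unfold Spec_find_top_heavy_expansions; infer_instance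

-- ===== CLAIM (what is proved, stated in full; the proofs are below) =====
def Claim_equal_find_top_heavy_expansions : Prop := ∀ (number_of_expansions : Int), Dom_find_top_heavy_expansions number_of_expansions → Spec_find_top_heavy_expansions number_of_expansions (find_top_heavy_expansions number_of_expansions)

-- ===== LEMMAS AND PROOFS =====

-- abbreviations used only by the proofs
def pvPairs (dens : List Int) : List (Int × Int) :=
  (dens.zip (PySem.List.slice dens (some 1) none)).map (fun p => (p.1 + p.2, p.2))

def pvCount (expansions : List (Int × Int)) : Int :=
  (PySem.List.slice expansions (some 1) none).foldl
    (fun c p => if PySem.Str.len (PySem.Int.toStr p.1) > PySem.Str.len (PySem.Int.toStr p.2) then c + 1 else c) 0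

theorem pv_zip_tail_append (l : List Int) (x : Int) (d : Int) (h : l.getLast? = some d) :
    (l ++ [x]).zip ((l ++ [x]).tail) = l.zip l.tail ++ [(d, x)] := by
  induction l with
  | nil => simp at h
  | cons a t ih =>
    cases t with
    | nil => simp_all
    | cons b t' =>
      have h' : (b :: t').getLast? = some d := by
        simpa [List.getLast?_cons_cons] using h
      have := ih h'
      simp only [List.cons_append, List.tail_cons, List.zip_cons_cons] at this ⊢
      rw [this]

theorem pv_pairs_append (dens : List Int) (x d : Int)
    (h : PySem.List.pyGet? dens (-1) = some d) :
    pvPairs (dens ++ [x]) = pvPairs dens ++ [(d + x, x)] := by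
  rw [PySem.List.pyGet?_neg_one] at h
  unfold pvPairs
  rw [PySem.List.slice_from_one, PySem.List.slice_from_one, pv_zip_tail_append _ _ _ h]
  rw [List.map_append]
  rfl

theorem pv_count_append (e : List (Int × Int)) (p : Int × Int) (h : e ≠ []) :
    pvCount (e ++ [p]) = if PySem.Str.len (PySem.Int.toStr p.1) > PySem.Str.len (PySem.Int.toStr p.2) then pvCount e + 1 else pvCount e := by
  unfold pvCount
  rw [PySem.List.slice_from_one, PySem.List.slice_from_one]
  cases e with
  | nil => simp at h
  | cons a t =>
    simp only [List.cons_append, List.tail_cons, List.foldl_append, List.foldl_cons, List.foldl_nil]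

theorem pv_getLast?_append_singleton {α : Type} (l : List α) (x : α) :
    (l ++ [x]).getLast? = some x := by simp

theorem pv_pyGet?_neg_two_append (l : List Int) (x d : Int)
    (h : PySem.List.pyGet? l (-1) = some d) :
    PySem.List.pyGet? (l ++ [x]) (-2) = some d := by
  rw [PySem.List.pyGet?_neg_one, List.getLast?_eq_getElem?] at h
  have hl : l ≠ [] := by rintro rfl; simp at h
  have h1 : 0 < l.length := List.length_pos_iff.mpr hl
  have hcast : ((-2 : Int)) = -((2 : ℕ) : Int) := by norm_num
  rw [hcast, PySem.List.pyGet?_neg_natCast (l ++ [x]) 2 (by omega) (by simp; omega)]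
  have e : (l ++ [x]).length - 2 = l.length - 1 := by simp
  rw [e, List.getElem?_append_left (by omega)]
  exact h

-- Loop invariant: exps is exactly the pair derivation of dens, cnt the count over its tail,
-- and the last pair / last two denominators line up; then A's fold equals the staged result.
theorem pv_loop_eq (l : List Int) : ∀ (exps : List (Int × Int)) (cnt : Int) (dens : List Int) (prev d : Int),
    PySem.List.pyGet? dens (-1) = some d →
    PySem.List.pyGet? dens (-2) = some prev →
    PySem.List.pyGet? exps (-1) = some (prev + d, d) →
    exps = pvPairs dens →
    cnt = pvCount exps →
    l.foldl pvStepA (exps, cnt) =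
      (pvPairs (l.foldl pvStepB dens), pvCount (pvPairs (l.foldl pvStepB dens))) := by
  induction l with
  | nil =>
    intro exps cnt dens prev d _ _ _ h4 h5
    simp [List.foldl, h4, h5]
  | cons x xs ih =>
    intro exps cnt dens prev d h1 h2 h3 h4 h5
    have hne : exps ≠ [] := by
      intro he; rw [he] at h3; simp [PySem.List.pyGet?_neg_one] at h3
    have hA : pvStepA (exps, cnt) x =
        (exps ++ [(d + (2 * d + prev), 2 * d + prev)],
         if PySem.Str.len (PySem.Int.toStr (d + (2 * d + prev))) > PySem.Str.len (PySem.Int.toStr (2 * d + prev)) then cnt + 1 else cnt) := by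
      simp only [pvStepA, h3]
      have e1 : prev + d + 2 * d = d + (2 * d + prev) := by ring
      have e2 : prev + d + d = 2 * d + prev := by ring
      simp [e1, e2]
    have hB : pvStepB dens x = dens ++ [2 * d + prev] := by
      simp [pvStepB, h1, h2]
    rw [List.foldl_cons, List.foldl_cons, hA, hB]
    have hp : pvPairs (dens ++ [2 * d + prev]) = exps ++ [(d + (2 * d + prev), 2 * d + prev)] := by
      rw [pv_pairs_append dens _ d h1, ← h4]
    have hc : pvCount (exps ++ [(d + (2 * d + prev), 2 * d + prev)]) =
        if PySem.Str.len (PySem.Int.toStr (d + (2 * d + prev))) > PySem.Str.len (PySem.Int.toStr (2 * d + prev)) then cnt + 1 else cnt := by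
      rw [pv_count_append _ _ hne, ← h5]
    refine ih _ _ (dens ++ [2 * d + prev]) d (2 * d + prev) ?_ ?_ ?_ hp.symm hc.symm
    · rw [PySem.List.pyGet?_neg_one]; exact pv_getLast?_append_singleton _ _
    · exact pv_pyGet?_neg_two_append dens _ d h1
    · rw [PySem.List.pyGet?_neg_one, pv_getLast?_append_singleton]

-- ===== VERDICT (by name: the statement is the Claim_ definition above) =====
theorem find_top_heavy_expansions_spec : Claim_equal_find_top_heavy_expansions := by
  intro n _
  unfold Spec_find_top_heavy_expansions find_top_heavy_expansions find_top_heavy_expansions_alt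
  show _ = (pvPairs _, pvCount (pvPairs _))
  exact pv_loop_eq _ [(3, 2)] 0 [1, 2] 1 2 (by decide) (by decide) (by decide) (by decide) (by decide)
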